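-- pv_equiv track=rewrite | github.com/V-SANT/TDA_2024_1C | TP1/tp1_greedy.py | obtener_suma_ponderada_por_peso
-- ===== SOURCE A (Python) =====
-- def obtener_peso_batalla(batalla):
--     _, peso_batalla = batalla
--     return peso_batalla
--
-- def obtener_suma_ponderada_por_peso(batallas):
--     regla = lambda batalla: obtener_peso_batalla(batalla)
--     batallas_ordenadas = sorted(batallas, key=regla, reverse=True)
--
--     suma_ponderada = 0
--     suma_parcial = 0
--
--     for batalla in batallas_ordenadas:
--         tiempo_batalla,peso_batalla = batalla
--         suma_parcial += tiempo_batalla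
--         suma_ponderada += suma_parcial*peso_batalla
--
--     return suma_ponderada
-- ===== SOURCE B (Python) =====
-- def obtener_suma_ponderada_por_peso(batallas):
--     # Sort-free pairwise formulation: each battle contributes tiempo*peso, and each
--     # later battle pairs with it contributing t_high * p_low, ties by original order
--     # (exactly what the stable descending sort produces).
--     total = 0
--     resto = batallas
--     while resto:
--         (ti, pi), resto = resto[0], resto[1:]
--         total += ti * pi
--         for tj, pj in resto:
--             total += ti * pj if pi >= pj else tj * pi
--     return total
-- ===== Notes on version B (the rewrite author's own statement) =====
-- stated objective: alternative
-- what changed: B drops the sort entirely: it computes the same total as a pairwise sum over suffixes (each battle adds tiempo*peso, and each pair adds t_high*p_low with ties broken by original order, which is exactly what A's stable descending sort followed by a prefix-sum loop produces).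
import Mathlib
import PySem

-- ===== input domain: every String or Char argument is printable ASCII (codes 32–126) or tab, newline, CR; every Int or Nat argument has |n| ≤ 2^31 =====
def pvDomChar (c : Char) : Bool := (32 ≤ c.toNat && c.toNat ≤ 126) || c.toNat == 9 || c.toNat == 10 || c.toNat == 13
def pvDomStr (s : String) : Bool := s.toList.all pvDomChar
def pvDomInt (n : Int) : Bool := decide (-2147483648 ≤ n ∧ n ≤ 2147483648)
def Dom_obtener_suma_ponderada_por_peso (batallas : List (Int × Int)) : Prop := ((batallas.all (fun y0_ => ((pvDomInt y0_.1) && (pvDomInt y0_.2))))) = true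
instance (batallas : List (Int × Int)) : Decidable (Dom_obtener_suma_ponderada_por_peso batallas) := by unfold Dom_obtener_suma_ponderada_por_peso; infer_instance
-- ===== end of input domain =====

-- B drops A's sort + prefix-sum loop and computes the same total as a pairwise sum
-- over suffixes (each pair contributes t_high * p_low, ties by original order);
-- objective: alternative algorithm, not faster.

-- ===== PORT A =====
-- helper obtener_peso_batalla: returns the second component
def obtener_peso_batalla (batalla : Int × Int) : Int := batalla.2

def obtener_suma_ponderada_por_peso (batallas : List (Int × Int)) : Int :=
  let batallas_ordenadas := PySem.List.sorted batallas (fun b => obtener_peso_batalla b) true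
  (batallas_ordenadas.foldl
    (fun st b => (st.1 + (st.2 + b.1) * b.2, st.2 + b.1)) ((0 : Int), (0 : Int))).1

-- ===== PORT B =====
-- the while loop over suffixes: state is the running total; each step consumes the
-- head (ti, pi), adds ti*pi, then adds the cross terms against the remaining list
def pvLoopB (total : Int) : List (Int × Int) → Int
  | [] => total
  | (ti, pi) :: resto =>
      pvLoopB
        (resto.foldl
          (fun t b => t + (if b.2 ≤ pi then ti * b.2 else b.1 * pi))
          (total + ti * pi))
        resto

def obtener_suma_ponderada_por_peso_alt (batallas : List (Int × Int)) : Int :=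
  pvLoopB 0 batallas

-- ===== PRECONDITION & SPEC =====
def Spec_obtener_suma_ponderada_por_peso (batallas : List (Int × Int)) (out : Int) : Prop := out = obtener_suma_ponderada_por_peso_alt batallas
instance (batallas : List (Int × Int)) (out : Int) : Decidable (Spec_obtener_suma_ponderada_por_peso batallas out) := by unfold Spec_obtener_suma_ponderada_por_peso; infer_instance

-- ===== CLAIM (what is proved, stated in full; the proofs are below) =====
def Claim_equal_obtener_suma_ponderada_por_peso : Prop := ∀ (batallas : List (Int × Int)), Dom_obtener_suma_ponderada_por_peso batallas → Spec_obtener_suma_ponderada_por_peso batallas (obtener_suma_ponderada_por_peso batallas)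

-- ===== LEMMAS AND PROOFS =====

-- the cross contribution of the pair (x earlier, z later)
def pvF (x z : Int × Int) : Int := if z.2 ≤ x.2 then x.1 * z.2 else z.1 * x.2

-- accumulator-free form of B's loop
def pvPairSum : List (Int × Int) → Int
  | [] => 0
  | x :: L => x.1 * x.2 + (L.map (pvF x)).sum + pvPairSum L

theorem pvFoldAdd (L : List (Int × Int)) (g : Int × Int → Int) (c : Int) :
    L.foldl (fun t b => t + g b) c = c + (L.map g).sum := by
  induction L generalizing c with
  | nil => simp
  | cons hd tl ih => simp [ih]; ring

theorem pvLoopB_eq (L : List (Int × Int)) (total : Int) :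
    pvLoopB total L = total + pvPairSum L := by
  induction L generalizing total with
  | nil => simp [pvLoopB, pvPairSum]
  | cons hd tl ih =>
    obtain ⟨ti, pi⟩ := hd
    have hg : (fun (t : Int) (b : Int × Int) => t + (if b.2 ≤ pi then ti * b.2 else b.1 * pi))
        = (fun (t : Int) (b : Int × Int) => t + pvF (ti, pi) b) := rfl
    simp only [pvLoopB, pvPairSum, ih, hg, pvFoldAdd]
    ring

theorem pvF_comm_of_lt (x z : Int × Int) (h : z.2 < x.2) : pvF x z = pvF z x := by
  simp [pvF, le_of_lt h, not_le.mpr h]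

-- A's loop in closed form
theorem foldA_closed (L : List (Int × Int)) (s q : Int) :
    (L.foldl (fun st b => (st.1 + (st.2 + b.1) * b.2, st.2 + b.1)) (s, q)) =
      (s + (L.foldl (fun st b => (st.1 + (st.2 + b.1) * b.2, st.2 + b.1)) ((0:Int),(0:Int))).1
         + q * (L.map Prod.snd).sum,
       q + (L.map Prod.fst).sum) := by
  induction L generalizing s q with
  | nil => simp
  | cons hd tl ih =>
    simp only [List.foldl_cons, List.map_cons, List.sum_cons]
    rw [ih, ih (0 + (0 + hd.1) * hd.2) (0 + hd.1)]
    simp only [Prod.mk.injEq]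
    constructor <;> ring

theorem map_pvF_head (hd : Int × Int) (tl : List (Int × Int))
    (hhd : ∀ z ∈ tl, z.2 ≤ hd.2) :
    (tl.map (pvF hd)).sum = hd.1 * (tl.map Prod.snd).sum := by
  induction tl with
  | nil => simp
  | cons z zs ihz =>
    have hz : z.2 ≤ hd.2 := hhd z (by simp)
    simp only [List.map_cons, List.sum_cons, ihz (fun y hy => hhd y (by simp [hy]))]
    simp [pvF, hz]; ring

-- on a list sorted by non-increasing weight, A's loop computes the pairwise sum
theorem foldA_pairSum (S : List (Int × Int))
    (h : S.Pairwise (fun a b => b.2 ≤ a.2)) :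
    (S.foldl (fun st b => (st.1 + (st.2 + b.1) * b.2, st.2 + b.1)) ((0:Int),(0:Int))).1
      = pvPairSum S := by
  induction S with
  | nil => simp [pvPairSum]
  | cons hd tl ih =>
    obtain ⟨hhd, htl⟩ := List.pairwise_cons.mp h
    simp only [List.foldl_cons]
    rw [foldA_closed]
    simp only [pvPairSum, ih htl]
    rw [map_pvF_head hd tl hhd]; ring

theorem insertBy_perm (before : Int × Int → Int × Int → Bool) (x : Int × Int)
    (ys : List (Int × Int)) : (PySem.List.insertBy before x ys).Perm (x :: ys) := by
  induction ys with
  | nil => simp [PySem.List.insertBy]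
  | cons y ys ih =>
    by_cases hb : before x y
    · simp [PySem.List.insertBy, hb]
    · simp only [PySem.List.insertBy, hb, Bool.false_eq_true, if_false]
      exact ((ih.cons y).trans (List.Perm.swap x y ys))

theorem cross_perm (M M' : List (Int × Int)) (x : Int × Int) (h : M.Perm M') :
    (M.map (fun z => pvF z x)).sum = (M'.map (fun z => pvF z x)).sum :=
  (h.map _).sum_eq

theorem pairSum_append_singleton (L : List (Int × Int)) (x : Int × Int) :
    pvPairSum (L ++ [x]) = pvPairSum L + x.1 * x.2 + (L.map (fun z => pvF z x)).sum := by
  induction L with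
  | nil => simp [pvPairSum]
  | cons y ys ih =>
    simp only [List.cons_append, pvPairSum, ih, List.map_cons, List.sum_cons,
      List.map_append, List.sum_append, List.map_nil, List.sum_nil]
    ring

-- inserting x into a list sorted by non-increasing weight adds exactly the terms
-- the pairwise sum assigns to x placed at the end
theorem pairSum_insertBy (acc : List (Int × Int)) (x : Int × Int)
    (h : acc.Pairwise (fun a b => b.2 ≤ a.2)) :
    pvPairSum (PySem.List.insertBy (fun a b => decide (b.2 < a.2)) x acc)
      = pvPairSum acc + x.1 * x.2 + (acc.map (fun z => pvF z x)).sum := by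
  induction acc with
  | nil => simp [PySem.List.insertBy, pvPairSum]
  | cons y ys ih =>
    obtain ⟨hhd, htl⟩ := List.pairwise_cons.mp h
    by_cases hb : y.2 < x.2
    · have hcomm : ∀ z ∈ y :: ys, pvF x z = pvF z x := by
        intro z hz
        rcases List.mem_cons.mp hz with rfl | hz'
        · exact pvF_comm_of_lt x z hb
        · exact pvF_comm_of_lt x z (lt_of_le_of_lt (hhd z hz') hb)
      simp only [PySem.List.insertBy, decide_eq_true_eq, if_pos hb]
      simp only [pvPairSum]
      have : ((y :: ys).map (pvF x)).sum = ((y :: ys).map (fun z => pvF z x)).sum := by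
        exact congrArg List.sum (List.map_congr_left hcomm)
      rw [this]
      simp only [List.map_cons, List.sum_cons]
      ring
    · simp only [PySem.List.insertBy, decide_eq_true_eq, if_neg hb]
      simp only [pvPairSum, ih htl]
      have hmap : ((PySem.List.insertBy (fun a b => decide (b.2 < a.2)) x ys).map (pvF y)).sum
          = ((x :: ys).map (pvF y)).sum :=
        ((insertBy_perm _ x ys).map _).sum_eq
      rw [hmap]
      simp only [List.map_cons, List.sum_cons]
      ring

-- the pairwise sum is invariant under A's stable descending sort
theorem pairSum_sorted (L : List (Int × Int)) :
    pvPairSum (PySem.List.sorted L (fun b => b.2) true) = pvPairSum L := by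
  induction L using List.reverseRecOn with
  | nil => simp [PySem.List.sorted_rev_eq_foldl_insertBy]
  | append_singleton L x ih =>
    have hsort : PySem.List.sorted (L ++ [x]) (fun b => b.2) true
        = PySem.List.insertBy (fun a b => decide (b.2 < a.2)) x
            (PySem.List.sorted L (fun b => b.2) true) := by
      rw [PySem.List.sorted_rev_eq_foldl_insertBy, List.foldl_append,
        ← PySem.List.sorted_rev_eq_foldl_insertBy]
      rfl
    rw [hsort,
      pairSum_insertBy _ _ (PySem.List.sorted_pairwise_rev L (fun b => b.2)),
      cross_perm _ L x (PySem.List.sorted_perm L (fun b => b.2) true),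
      ih, pairSum_append_singleton]

-- ===== VERDICT (by name: the statement is the Claim_ definition above) =====
theorem obtener_suma_ponderada_por_peso_spec : Claim_equal_obtener_suma_ponderada_por_peso := by
  intro batallas _
  unfold Spec_obtener_suma_ponderada_por_peso obtener_suma_ponderada_por_peso
    obtener_suma_ponderada_por_peso_alt obtener_peso_batalla
  rw [pvLoopB_eq, foldA_pairSum _ (PySem.List.sorted_pairwise_rev batallas (fun b => b.2)),
    pairSum_sorted]
  ring
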